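-- pv_equiv track=rewrite | github.com/little-isaac/scaler | intermediate/day_26/hw_amazing_subarrays.py | solve
-- ===== SOURCE A (Python) =====
-- def solve(A):
--     n = len(A)
--     ans = 0
--     elemsToCheck = ['a','e','i','o','u','A','E','I','O','U']
--     counter = 0
--     for i in range(n-1,-1,-1):
--         ele = A[i]
--         counter = counter + 1
--         if ele in elemsToCheck:
--             ans = ans + counter
--     return ans % 10003
-- ===== SOURCE B (Python) =====
-- def solve(A):
--     # Running prefix count: each position j adds the number of vowels seen so far,
--     # since a vowel at i is counted once for every j >= i (total n - i times).
--     ans = 0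
--     v = 0
--     for c in A:
--         if c in "aeiouAEIOU":
--             v += 1
--         ans += v
--     return ans % 10003
-- ===== Notes on version B (the rewrite author's own statement) =====
-- stated objective: alternative
-- what changed: Replaces A's backward range(n-1,-1,-1) loop that adds a suffix-length counter at each vowel with a forward pass over the characters maintaining a running prefix vowel count that is added at every position (sum of prefix vowel counts equals sum of vowel suffix lengths); iterating the string directly avoids per-step indexing A[i] over a reversed range.
import Mathlib
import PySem

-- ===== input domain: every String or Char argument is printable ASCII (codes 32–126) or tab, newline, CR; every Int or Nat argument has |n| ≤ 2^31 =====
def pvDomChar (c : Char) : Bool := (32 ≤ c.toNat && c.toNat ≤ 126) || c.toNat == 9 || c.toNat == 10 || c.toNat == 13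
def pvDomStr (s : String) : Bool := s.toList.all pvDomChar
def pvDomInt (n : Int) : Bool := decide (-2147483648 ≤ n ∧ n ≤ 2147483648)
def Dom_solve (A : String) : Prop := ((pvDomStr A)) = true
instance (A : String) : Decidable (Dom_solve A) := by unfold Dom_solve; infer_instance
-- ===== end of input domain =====

-- B replaces A's backward suffix-counter loop by a forward pass that adds a running prefix vowel count at every position (no speed claim).

-- ===== PORT A =====
def solveVowels : List Char := ['a','e','i','o','u','A','E','I','O','U']

-- the loop 'for i in range(n-1,-1,-1)' carrying state (ans, counter); index i is always in range, so pyGetD's default is unreachable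
def solveLoop (l : List Char) (init : Int × Int) : Int × Int :=
  (PySem.List.pyRange ((l.length : Int) - 1) (-1) (-1)).foldl
    (fun st i =>
      let ele := PySem.List.pyGetD l i ' '
      let counter := st.2 + 1
      (if solveVowels.contains ele then st.1 + counter else st.1, counter))
    init

def solve (A : String) : Int :=
  PySem.Int.mod (solveLoop A.toList (0, 0)).1 10003

-- ===== PORT B =====
-- forward loop carrying (ans, v): v counts vowels seen so far, ans adds v at every character
def solve_alt (A : String) : Int :=
  PySem.Int.mod
    (A.toList.foldl
      (fun st c =>
        let v := if ("aeiouAEIOU".toList).contains c then st.2 + 1 else st.2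
        (st.1 + v, v))
      (0, 0)).1
    10003

-- ===== PRECONDITION & SPEC =====
def Spec_solve (A : String) (out : Int) : Prop := out = solve_alt A
instance (A : String) (out : Int) : Decidable (Spec_solve A out) := by unfold Spec_solve; infer_instance

-- ===== CLAIM (what is proved, stated in full; the proofs are below) =====
def Claim_equal_solve : Prop := ∀ (A : String), Dom_solve A → Spec_solve A (solve A)

-- ===== LEMMAS AND PROOFS =====

-- canonical form: each vowel at index i contributes n - i
def solveSum (l : List Char) (n : Int) : Int :=
  ((PySem.List.enumerate l).map
    (fun p => if solveVowels.contains p.2 then n - p.1 else 0)).sum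

def solveCnt (l : List Char) : Int :=
  (l.map (fun c => if solveVowels.contains c then (1 : Int) else 0)).sum

theorem solveLoop_snoc (l : List Char) (x : Char) (a c : Int) :
    solveLoop (l ++ [x]) (a, c)
      = solveLoop l ((if solveVowels.contains x then a + (c + 1) else a), c + 1) := by
  unfold solveLoop
  have hlen : ((l ++ [x]).length : Int) - 1 = (l.length : Int) := by simp
  rw [hlen]
  rw [PySem.List.pyRange_neg_one_cons (by omega)]
  rw [List.foldl_cons]
  have hget : PySem.List.pyGetD (l ++ [x]) (l.length : Int) ' ' = x := by
    simp [PySem.List.pyGetD_natCast]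
  rw [hget]
  apply PySem.List.foldl_congr_mem
  intro acc i hi
  have hmem := (PySem.List.mem_pyRange_neg_one.mp hi)
  have h0 : 0 ≤ i := by omega
  have h1 : i < (l.length : Int) := by omega
  have : PySem.List.pyGetD (l ++ [x]) i ' ' = PySem.List.pyGetD l i ' ' := by
    lift i to ℕ using h0 with k
    have hk : k < l.length := by exact_mod_cast h1
    simp [PySem.List.pyGetD_natCast, List.getD_eq_getElem?_getD,
      List.getElem?_append_left hk]
  rw [this]

theorem solveLoop_eq (l : List Char) (a n : Int) :
    (solveLoop l (a, n - l.length)).1 = a + solveSum l n := by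
  induction l using List.reverseRecOn generalizing a with
  | nil =>
      unfold solveLoop solveSum
      rw [PySem.List.pyRange_neg_one_eq_nil (by simp)]
      simp [PySem.List.enumerate]
  | append_singleton l x ih =>
      have hlen : ((l ++ [x]).length : Int) = (l.length : Int) + 1 := by simp
      have hc : n - ((l ++ [x]).length : Int) = n - (l.length : Int) - 1 := by
        rw [hlen]; ring
      rw [hc, solveLoop_snoc]
      have harg : n - (l.length : Int) - 1 + 1 = n - (l.length : Int) := by ring
      rw [harg, ih]
      unfold solveSum
      rw [PySem.List.enumerate_append]
      simp only [List.map_append, List.sum_append, PySem.List.enumerate,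
        List.map_cons, List.map_nil, List.sum_cons, List.sum_nil]
      split_ifs <;> ring

-- the suffix-shift identity: raising n by one adds the vowel count
theorem solveSum_shift (l : List Char) (n : Int) :
    solveSum l (n + 1) = solveSum l n + solveCnt l := by
  unfold solveSum solveCnt
  induction l using List.reverseRecOn with
  | nil => simp [PySem.List.enumerate]
  | append_singleton l x ih =>
      rw [PySem.List.enumerate_append]
      simp only [List.map_append, List.sum_append, PySem.List.enumerate_cons,
        PySem.List.enumerate_nil, List.map_cons, List.map_nil, List.sum_cons,
        List.sum_nil]
      rw [ih]
      split_ifs <;> ring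

-- B's forward loop computes (solveSum l l.length, solveCnt l)
theorem solve_alt_loop_eq (l : List Char) :
    l.foldl
      (fun st c =>
        let v := if ("aeiouAEIOU".toList).contains c then st.2 + 1 else st.2
        (st.1 + v, v))
      ((0 : Int), (0 : Int))
      = (solveSum l l.length, solveCnt l) := by
  have hv : ("aeiouAEIOU".toList) = solveVowels := by decide
  induction l using List.reverseRecOn with
  | nil => simp [solveSum, solveCnt, PySem.List.enumerate]
  | append_singleton l x ih =>
      rw [List.foldl_append, ih]
      simp only [List.foldl_cons, List.foldl_nil, hv]
      have hlen : (((l ++ [x]).length : ℕ) : Int) = (l.length : Int) + 1 := by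
        simp
      have hsum : solveSum (l ++ [x]) ((l ++ [x]).length)
          = solveSum l (l.length : Int) + solveCnt l
            + (if solveVowels.contains x then 1 else 0) := by
        unfold solveSum solveCnt
        rw [hlen, PySem.List.enumerate_append]
        simp only [List.map_append, List.sum_append, PySem.List.enumerate,
          List.map_cons, List.map_nil, List.sum_cons, List.sum_nil]
        have := solveSum_shift l (l.length : Int)
        unfold solveSum solveCnt at this
        rw [this]
        split_ifs <;> ring
      have hcnt : solveCnt (l ++ [x])
          = solveCnt l + (if solveVowels.contains x then 1 else 0) := by
        unfold solveCnt
        simp only [List.map_append, List.sum_append, List.map_cons, List.map_nil,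
          List.sum_cons, List.sum_nil]
        split_ifs <;> ring
      rw [hsum, hcnt]
      unfold solveCnt
      split_ifs <;> simp <;> ring

-- ===== VERDICT (by name: the statement is the Claim_ definition above) =====
theorem solve_spec : Claim_equal_solve := by
  intro A _
  unfold Spec_solve solve solve_alt
  rw [solve_alt_loop_eq]
  have h := solveLoop_eq A.toList 0 (A.toList.length : Int)
  have h2 : ((A.toList.length : Int)) - (A.toList.length : Int) = 0 := by ring
  rw [h2] at h
  rw [h]
  simp
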